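-- pv_equiv track=rewrite | github.com/Clue88/AoC2020 | Day 18/18-1.py | find_inner_parentheses
-- ===== SOURCE A (Python) =====
-- def find_inner_parentheses(expression):
--     start = -1
--     end = -1
--     for index, char in enumerate(expression):
--         if char == '(':
--             start = index
--         if char == ')':
--             end = index
--             break
--     return expression[start:end+1]
-- ===== SOURCE B (Python) =====
-- def find_inner_parentheses(expression):
--     # Single pass that builds the innermost group directly: reset the buffer at
--     # every '(', emit '(' + buffer + ')' at the first ')'; no indices, no slicing.
--     acc = None  # chars seen since the most recent '(' (None: no '(' seen yet)
--     for char in expression: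
--         if char == '(':
--             acc = []
--         elif char == ')':
--             return '(' + ''.join(acc) + ')' if acc is not None else ''
--         elif acc is not None:
--             acc.append(char)
--     return ''
-- ===== Notes on version B (the rewrite author's own statement) =====
-- stated objective: alternative
-- what changed: A records start/end indices in a scan and slices the original string; B is a single pass that constructs the innermost group itself with a buffer reset at every '(' and emitted at the first ')', with no indices and no slicing.
-- intended difference: On strings whose first closing parenthesis is the final character and that have no opening parenthesis before it, A's start index stays -1 so its final slice wraps around and returns that single closing parenthesis, while B returns the empty string, which is the intended value since no parenthesized group exists. — e.g. on find_inner_parentheses("ab)"): A returns ")", B returns ""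
import Mathlib
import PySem

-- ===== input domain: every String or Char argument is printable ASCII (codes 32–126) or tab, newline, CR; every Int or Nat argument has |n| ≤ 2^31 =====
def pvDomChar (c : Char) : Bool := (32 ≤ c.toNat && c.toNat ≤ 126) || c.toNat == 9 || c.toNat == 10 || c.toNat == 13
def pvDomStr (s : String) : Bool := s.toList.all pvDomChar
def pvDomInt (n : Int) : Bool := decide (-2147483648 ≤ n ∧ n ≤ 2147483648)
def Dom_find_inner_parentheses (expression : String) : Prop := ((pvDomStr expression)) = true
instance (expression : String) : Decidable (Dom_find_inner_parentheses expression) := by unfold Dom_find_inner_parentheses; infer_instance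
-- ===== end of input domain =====

-- B replaces A's index-recording scan + slice of the original string by a single pass that
-- CONSTRUCTS the innermost group itself (a buffer reset at every opening parenthesis, emitted
-- at the first closing one); where A's -1 start wraps around (D_ below) B returns the empty string.

-- ===== PORT A =====
-- A's for-loop with break: carries (start) and stops at the first ')'.
def findInnerLoopA : List Char → Nat → Int → Int × Int
  | [], _, start => (start, -1)
  | c :: rest, index, start =>
      let start' := if c = '(' then (index : Int) else start
      if c = ')' then (start', (index : Int)) else findInnerLoopA rest (index + 1) start'

def find_inner_parentheses (expression : String) : String :=
  let p := findInnerLoopA expression.toList 0 (-1)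
  PySem.Str.slice expression (some p.1) (some (p.2 + 1))

-- ===== PORT B =====
-- B's for-loop: acc = chars since the most recent '(' (none: no '(' seen yet);
-- at the first ')' it returns '(' + ''.join(acc) + ')' (or '' if acc is None).
def findInnerLoopB : List Char → Option (List Char) → List Char
  | [], _ => []
  | c :: rest, acc =>
      if c = '(' then findInnerLoopB rest (some [])
      else if c = ')' then
        match acc with
        | some a => '(' :: a ++ [')']
        | none => []
      else findInnerLoopB rest (acc.map (· ++ [c]))

def find_inner_parentheses_alt (expression : String) : String :=
  String.ofList (findInnerLoopB expression.toList none)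

-- ===== PRECONDITION & SPEC =====
-- On strings whose first closing parenthesis is the final character and that have no opening
-- parenthesis before it, A's start index stays -1 so its final slice wraps around and returns
-- that single closing parenthesis, while B returns the empty string, which is the intended
-- value since no parenthesized group exists.
def D_find_inner_parentheses (expression : String) : Prop :=
  expression.toList ≠ [] ∧ PySem.List.pyGet? expression.toList (-1) = some ')' ∧
    expression.toList.dropLast.all (fun c => !(c == '(' || c == ')')) = true
instance (expression : String) : Decidable (D_find_inner_parentheses expression) := by
  unfold D_find_inner_parentheses; infer_instance

def Spec_find_inner_parentheses (expression : String) (out : String) : Prop :=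
  ¬ D_find_inner_parentheses expression → out = find_inner_parentheses_alt expression
instance (expression : String) (out : String) : Decidable (Spec_find_inner_parentheses expression out) := by
  unfold Spec_find_inner_parentheses; infer_instance

def pvDiffWitness_find_inner_parentheses : String := "ab)"
def pvDiffWitnessOut_find_inner_parentheses : String × String := (")", "")

-- ===== CLAIM (what is proved, stated in full; the proofs are below) =====
def Claim_unchanged_find_inner_parentheses : Prop := ∀ (expression : String), Dom_find_inner_parentheses expression → Spec_find_inner_parentheses expression (find_inner_parentheses expression)
def Claim_changed_find_inner_parentheses : Prop := Dom_find_inner_parentheses (pvDiffWitness_find_inner_parentheses) ∧ D_find_inner_parentheses (pvDiffWitness_find_inner_parentheses) ∧ find_inner_parentheses (pvDiffWitness_find_inner_parentheses) = pvDiffWitnessOut_find_inner_parentheses.1 ∧ find_inner_parentheses_alt (pvDiffWitness_find_inner_parentheses) = pvDiffWitnessOut_find_inner_parentheses.2 ∧ pvDiffWitnessOut_find_inner_parentheses.1 ≠ pvDiffWitnessOut_find_inner_parentheses.2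
def Claim_exact_find_inner_parentheses : Prop := ∀ (expression : String), Dom_find_inner_parentheses expression → D_find_inner_parentheses expression → find_inner_parentheses expression ≠ find_inner_parentheses_alt expression

-- ===== LEMMAS AND PROOFS =====

-- Spec helpers: first / last index of a character in a list, -1 if absent.
def firstIdxC (c0 : Char) : List Char → Int
  | [] => -1
  | c :: t => if c = c0 then 0 else (let r := firstIdxC c0 t; if r = -1 then -1 else r + 1)

def lastIdxC (c0 : Char) : List Char → Int
  | [] => -1
  | c :: t => let r := lastIdxC c0 t; if r = -1 then (if c = c0 then 0 else -1) else r + 1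

theorem neg_one_le_firstIdxC (c0 : Char) (cs : List Char) : -1 ≤ firstIdxC c0 cs := by
  induction cs with
  | nil => simp [firstIdxC]
  | cons c t ih => simp only [firstIdxC]; split_ifs <;> omega

theorem firstIdxC_lt_length (c0 : Char) (cs : List Char) :
    firstIdxC c0 cs < (cs.length : Int) := by
  induction cs with
  | nil => simp [firstIdxC]
  | cons c t ih => simp only [firstIdxC, List.length_cons]; split_ifs <;> push_cast <;> omega

theorem neg_one_le_lastIdxC (c0 : Char) (cs : List Char) : -1 ≤ lastIdxC c0 cs := by
  induction cs with
  | nil => simp [lastIdxC]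
  | cons c t ih => simp only [lastIdxC]; split_ifs <;> omega

theorem lastIdxC_lt_length (c0 : Char) (cs : List Char) :
    lastIdxC c0 cs < (cs.length : Int) := by
  induction cs with
  | nil => simp [lastIdxC]
  | cons c t ih => simp only [lastIdxC, List.length_cons]; split_ifs <;> push_cast <;> omega

theorem firstIdxC_getElem (c0 : Char) (cs : List Char) (h : firstIdxC c0 cs ≠ -1) :
    cs[(firstIdxC c0 cs).toNat]? = some c0 := by
  induction cs with
  | nil => simp [firstIdxC] at h
  | cons c t ih =>
      simp only [firstIdxC] at h ⊢
      by_cases hc : c = c0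
      · simp [hc]
      · simp only [if_neg hc] at h ⊢
        by_cases hr : firstIdxC c0 t = -1
        · simp [hr] at h
        · have h0 : 0 ≤ firstIdxC c0 t := by have := neg_one_le_firstIdxC c0 t; omega
          have : (firstIdxC c0 t + 1).toNat = (firstIdxC c0 t).toNat + 1 := by omega
          simp only [if_neg hr, this, List.getElem?_cons_succ]
          exact ih hr

theorem firstIdxC_take_not_mem (c0 : Char) (cs : List Char) :
    ∀ c ∈ cs.take (firstIdxC c0 cs).toNat, c ≠ c0 := by
  induction cs with
  | nil => simp
  | cons c t ih =>
      simp only [firstIdxC]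
      by_cases hc : c = c0
      · simp [hc]
      · simp only [if_neg hc]
        by_cases hr : firstIdxC c0 t = -1
        · simp [hr]
        · have h0 : 0 ≤ firstIdxC c0 t := by have := neg_one_le_firstIdxC c0 t; omega
          have : (firstIdxC c0 t + 1).toNat = (firstIdxC c0 t).toNat + 1 := by omega
          simp only [if_neg hr, this, List.take_succ_cons, List.mem_cons]
          rintro x (rfl | hx)
          · exact hc
          · exact ih x hx

theorem lastIdxC_eq_neg_one_iff (c0 : Char) (cs : List Char) :
    lastIdxC c0 cs = -1 ↔ ∀ c ∈ cs, c ≠ c0 := by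
  induction cs with
  | nil => simp [lastIdxC]
  | cons c t ih =>
      have hr := neg_one_le_lastIdxC c0 t
      simp only [lastIdxC, List.mem_cons]
      by_cases h : lastIdxC c0 t = -1
      · by_cases hc : c = c0
        · simp only [if_pos h, if_pos hc]
          constructor
          · omega
          · intro hall; exact absurd hc (hall c (Or.inl rfl))
        · simp only [if_pos h, if_neg hc]
          constructor
          · intro _ x hx
            rcases hx with rfl | hx
            · exact hc
            · exact ih.1 h x hx
          · intro _; trivial
      · simp only [if_neg h]
        constructor
        · omega
        · intro hall
          exact absurd (ih.2 (fun x hx => hall x (Or.inr hx))) h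

-- firstIdxC over a clean prefix followed by c0.
theorem firstIdxC_append_c0 (c0 : Char) (l : List Char) (rest : List Char)
    (h : ∀ c ∈ l, c ≠ c0) : firstIdxC c0 (l ++ c0 :: rest) = (l.length : Int) := by
  induction l with
  | nil => simp [firstIdxC]
  | cons c t ih =>
      have hc : c ≠ c0 := h c (by simp)
      have ht := ih (fun x hx => h x (by simp [hx]))
      simp only [List.cons_append, firstIdxC, if_neg hc, ht, List.length_cons]
      have : ¬ ((t.length : Int) = -1) := by omega
      simp only [if_neg this]; push_cast; ring

-- B's loop, characterised by the first ')' and the last '(' before it.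
theorem loopB_spec (cs : List Char) (acc : Option (List Char)) :
    findInnerLoopB cs acc =
      (let e := firstIdxC ')' cs
       if e = -1 then []
       else
         let xs := cs.take e.toNat
         let r := lastIdxC '(' xs
         if r = -1 then
           (match acc with
            | some a => '(' :: (a ++ xs) ++ [')']
            | none => [])
         else '(' :: xs.drop (r.toNat + 1) ++ [')']) := by
  induction cs generalizing acc with
  | nil => simp [findInnerLoopB, firstIdxC]
  | cons c t ih =>
      simp only [findInnerLoopB]
      by_cases hc : c = ')'
      · have hco : ¬ c = '(' := by rw [hc]; decide
        subst hc
        cases acc <;> simp [hco, firstIdxC, lastIdxC]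
      · simp only [if_neg hc]
        have he' := neg_one_le_firstIdxC ')' t
        by_cases he : firstIdxC ')' t = -1
        · have hfc : firstIdxC ')' (c :: t) = -1 := by simp [firstIdxC, hc, he]
          by_cases ho : c = '('
          · rw [if_pos ho, ih]
            simp [hfc, he]
          · rw [if_neg ho, ih]
            simp [hfc, he]
        · have he0 : 0 ≤ firstIdxC ')' t := by omega
          have hfc : firstIdxC ')' (c :: t) = firstIdxC ')' t + 1 := by
            simp [firstIdxC, hc, he]
          have h1 : ¬ (firstIdxC ')' t + 1 = -1) := by omega
          have htn : (firstIdxC ')' t + 1).toNat = (firstIdxC ')' t).toNat + 1 := by omega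
          have hr' := neg_one_le_lastIdxC '(' (t.take (firstIdxC ')' t).toNat)
          by_cases ho : c = '('
          · rw [if_pos ho, ih]
            subst ho
            simp only [hfc, if_neg he, if_neg h1, htn, List.take_succ_cons, lastIdxC]
            by_cases hrt : lastIdxC '(' (t.take (firstIdxC ')' t).toNat) = -1
            · have : ¬ ((0 : Int) = -1) := by norm_num
              simp [hrt, this]
            · have h2 : ¬ (lastIdxC '(' (t.take (firstIdxC ')' t).toNat) + 1 = -1) := by omega
              have h3 : (lastIdxC '(' (t.take (firstIdxC ')' t).toNat) + 1).toNat
                  = (lastIdxC '(' (t.take (firstIdxC ')' t).toNat)).toNat + 1 := by omega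
              simp [hrt, h2, h3]
          · rw [if_neg ho, ih]
            simp only [hfc, if_neg he, if_neg h1, htn, List.take_succ_cons, lastIdxC]
            by_cases hrt : lastIdxC '(' (t.take (firstIdxC ')' t).toNat) = -1
            · simp only [hrt, if_neg ho]
              cases acc with
              | none => simp
              | some a => simp [Option.map]
            · have h2 : ¬ (lastIdxC '(' (t.take (firstIdxC ')' t).toNat) + 1 = -1) := by omega
              have h3 : (lastIdxC '(' (t.take (firstIdxC ')' t).toNat) + 1).toNat
                  = (lastIdxC '(' (t.take (firstIdxC ')' t).toNat)).toNat + 1 := by omega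
              simp [hrt, h2, h3]

-- A's loop, characterised by first ')' and the last '(' before it.
theorem loopA_spec (cs : List Char) (i0 : Nat) (st0 : Int) :
    findInnerLoopA cs i0 st0 =
      (let e := firstIdxC ')' cs
       let xs := if e = -1 then cs else cs.take e.toNat
       let r := lastIdxC '(' xs
       ((if r = -1 then st0 else (i0 : Int) + r),
        (if e = -1 then -1 else (i0 : Int) + e))) := by
  induction cs generalizing i0 st0 with
  | nil => simp [findInnerLoopA, firstIdxC, lastIdxC]
  | cons c t ih =>
      simp only [findInnerLoopA]
      by_cases hc : c = ')'
      · have hco : ¬ c = '(' := by rw [hc]; decide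
        simp [hc, firstIdxC, lastIdxC]
      · simp only [if_neg hc, ih]
        have he' := neg_one_le_firstIdxC ')' t
        by_cases he : firstIdxC ')' t = -1
        · have hfc : firstIdxC ')' (c :: t) = -1 := by simp [firstIdxC, hc, he]
          simp only [if_pos he, hfc]
          have hr' := neg_one_le_lastIdxC '(' t
          by_cases hrt : lastIdxC '(' t = -1
          · by_cases ho : c = '('
            · have hl : lastIdxC '(' ('(' :: t) = 0 := by simp [lastIdxC, hrt]
              simp [ho, hl, hrt]
            · have hl : lastIdxC '(' (c :: t) = -1 := by simp [lastIdxC, hrt, ho]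
              simp [hl, hrt, ho]
          · have hl : lastIdxC '(' (c :: t) = lastIdxC '(' t + 1 := by
              simp [lastIdxC, hrt]
            have h1 : ¬ (lastIdxC '(' t + 1 = -1) := by omega
            simp only [if_neg hrt, Prod.mk.injEq]
            constructor
            · split_ifs <;> push_cast <;> omega
            · rfl
        · have he0 : 0 ≤ firstIdxC ')' t := by omega
          have hfc : firstIdxC ')' (c :: t) = firstIdxC ')' t + 1 := by
            simp [firstIdxC, hc, he]
          have h1 : ¬ (firstIdxC ')' t + 1 = -1) := by omega
          simp only [if_neg he, hfc, if_neg h1]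
          have htn : (firstIdxC ')' t + 1).toNat = (firstIdxC ')' t).toNat + 1 := by omega
          rw [htn, List.take_succ_cons]
          have hr' := neg_one_le_lastIdxC '(' (t.take (firstIdxC ')' t).toNat)
          by_cases hrt : lastIdxC '(' (t.take (firstIdxC ')' t).toNat) = -1
          · have hl : lastIdxC '(' (c :: t.take (firstIdxC ')' t).toNat)
                = (if c = '(' then 0 else -1) := by simp [lastIdxC, hrt]
            by_cases ho : c = '('
            · simp only [hl, if_pos ho, hrt, if_neg (by norm_num : ¬((0:Int) = -1)),
                Prod.mk.injEq]
              constructor <;> push_cast <;> omega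
            · simp only [hl, if_neg ho, hrt, Prod.mk.injEq]
              constructor
              · simp
              · push_cast; omega
          · have hl : lastIdxC '(' (c :: t.take (firstIdxC ')' t).toNat)
                = lastIdxC '(' (t.take (firstIdxC ')' t).toNat) + 1 := by simp [lastIdxC, hrt]
            have h2 : ¬ (lastIdxC '(' (t.take (firstIdxC ')' t).toNat) + 1 = -1) := by omega
            simp only [hl, if_neg hrt, if_neg h2, Prod.mk.injEq]
            constructor <;> push_cast <;> omega

-- D_ restated at the Prop level.
theorem D_iff (s : String) : D_find_inner_parentheses s ↔
    (s.toList ≠ [] ∧ s.toList.getLast? = some ')' ∧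
      ∀ c ∈ s.toList.dropLast, c ≠ '(' ∧ c ≠ ')') := by
  unfold D_find_inner_parentheses
  rw [PySem.List.pyGet?_neg_one]
  simp [List.all_eq_true]

theorem lastIdxC_getElem (c0 : Char) (cs : List Char) (h : lastIdxC c0 cs ≠ -1) :
    cs[(lastIdxC c0 cs).toNat]? = some c0 := by
  induction cs with
  | nil => simp [lastIdxC] at h
  | cons c t ih =>
      simp only [lastIdxC] at h ⊢
      by_cases hr : lastIdxC c0 t = -1
      · simp only [if_pos hr] at h ⊢
        by_cases hc : c = c0
        · simp [hc]
        · simp [hc] at h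
      · have h0 : 0 ≤ lastIdxC c0 t := by have := neg_one_le_lastIdxC c0 t; omega
        have : (lastIdxC c0 t + 1).toNat = (lastIdxC c0 t).toNat + 1 := by omega
        simp only [if_neg hr, this, List.getElem?_cons_succ]
        exact ih hr

-- slice with a nonnegative start at the found '(' and stop just past the found ')'.
theorem slice_found (cs : List Char) (a b : Nat) (hab : a < b) (hb : b < cs.length)
    (ha : cs[a]? = some '(') (hbv : cs[b]? = some ')') :
    PySem.List.slice cs (some (a : Int)) (some ((b : Int) + 1)) =
      '(' :: (cs.take b).drop (a + 1) ++ [')'] := by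
  have hA : a < cs.length := by omega
  have hcast : ((b : Int) + 1) = ((b + 1 : Nat) : Int) := by push_cast; ring
  rw [hcast, PySem.List.slice_natCast]
  have hstep : b + 1 - a = (b - a) + 1 := by omega
  rw [hstep, List.drop_eq_getElem_cons hA, List.take_succ_cons]
  have hav : cs[a] = '(' := by simpa [List.getElem?_eq_getElem hA] using ha
  rw [hav]
  congr 1
  have e1 : (cs.take ((a + 1) + (b - a))).drop (a + 1) = (cs.drop (a + 1)).take (b - a) := by
    rw [List.drop_take]; congr 1; omega
  rw [← e1, show (a + 1) + (b - a) = b + 1 by omega, List.take_add_one, hbv]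
  have hlen2 : a + 1 ≤ (cs.take b).length := by rw [List.length_take]; omega
  exact List.drop_append_of_le_length hlen2

-- slice cs [a:0] is empty.
theorem slice_stop_zero (cs : List Char) (a : Int) :
    PySem.List.slice cs (some a) (some 0) = [] := by
  simp [PySem.List.slice, PySem.List.clampIdx]

-- slice cs [-1:b] is empty when b stops before the last element.
theorem slice_neg_one_short (cs : List Char) (b : Nat) (hlen : 1 ≤ cs.length)
    (h : b ≤ cs.length - 1) : PySem.List.slice cs (some (-1)) (some (b : Int)) = [] := by
  simp only [PySem.List.slice, PySem.List.clampIdx]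
  have h1 : ¬ ((b : Int) < 0) := by omega
  have h2 : ((-1 : Int) < 0) := by omega
  have h3 : ¬ ((cs.length : Int) + (-1) < 0) := by omega
  simp only [if_neg h1, if_pos h2, if_neg h3]
  have h4 : ((b:Int)).toNat = b := by omega
  have h5 : ((cs.length : Int) + (-1)).toNat = cs.length - 1 := by omega
  rw [h4, h5]
  have : min b cs.length - (cs.length - 1) = 0 := by omega
  simp [this]

-- slice cs [-1:len] is the last element.
theorem slice_neg_one_full (l : List Char) (c : Char) :
    PySem.List.slice (l ++ [c]) (some (-1)) (some ((l.length + 1 : Nat) : Int)) = [c] := by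
  simp only [PySem.List.slice, PySem.List.clampIdx]
  have hlen : (l ++ [c]).length = l.length + 1 := by simp
  have h1 : ¬ (((l.length + 1 : Nat) : Int) < 0) := by omega
  have h2 : ((-1 : Int) < 0) := by omega
  have h3 : ¬ (((l ++ [c]).length : Int) + (-1) < 0) := by omega
  simp only [if_neg h1, if_pos h2, if_neg h3]
  have h4 : (((l.length + 1 : Nat) : Int)).toNat = l.length + 1 := by omega
  have h5 : (((l ++ [c]).length : Int) + (-1)).toNat = l.length := by omega
  rw [h4, h5, hlen]
  have : min (l.length + 1) (l.length + 1) - l.length = 1 := by omega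
  rw [this]
  have : (l ++ [c]).drop l.length = [c] := List.drop_left
  rw [this]
  rfl

-- A = B at the list level, outside the D_ corner.
theorem main_list (cs : List Char)
    (hD : ¬ (cs ≠ [] ∧ cs.getLast? = some ')' ∧ ∀ c ∈ cs.dropLast, c ≠ '(' ∧ c ≠ ')')) :
    PySem.List.slice cs (some (findInnerLoopA cs 0 (-1)).1)
        (some ((findInnerLoopA cs 0 (-1)).2 + 1)) = findInnerLoopB cs none := by
  rw [loopA_spec, loopB_spec]
  by_cases he : firstIdxC ')' cs = -1
  · simp only [he, if_true]
    rw [show (-1 : Int) + 1 = 0 by ring]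
    exact slice_stop_zero cs _
  · have he0 : 0 ≤ firstIdxC ')' cs := by have := neg_one_le_firstIdxC ')' cs; omega
    have helt := firstIdxC_lt_length ')' cs
    simp only [if_neg he, Nat.cast_zero, zero_add]
    by_cases hr : lastIdxC '(' (cs.take (firstIdxC ')' cs).toNat) = -1
    · simp only [if_pos hr]
      have hne : (firstIdxC ')' cs).toNat ≠ cs.length - 1 := by
        intro heq
        apply hD
        have hnil : cs ≠ [] := by
          intro h; subst h; simp only [List.length_nil, Nat.cast_zero] at helt; omega
        refine ⟨hnil, ?_, ?_⟩
        · rw [List.getLast?_eq_getElem?, ← heq]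
          exact firstIdxC_getElem ')' cs he
        · intro c hc
          rw [List.dropLast_eq_take, ← heq] at hc
          exact ⟨(lastIdxC_eq_neg_one_iff '(' _).1 hr c hc, firstIdxC_take_not_mem ')' cs c hc⟩
      rw [show firstIdxC ')' cs + 1 = (((firstIdxC ')' cs).toNat + 1 : Nat) : Int) by omega]
      exact slice_neg_one_short cs _ (by omega) (by omega)
    · simp only [if_neg hr]
      have hr0 : 0 ≤ lastIdxC '(' (cs.take (firstIdxC ')' cs).toNat) := by
        have := neg_one_le_lastIdxC '(' (cs.take (firstIdxC ')' cs).toNat); omega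
      have hrlt := lastIdxC_lt_length '(' (cs.take (firstIdxC ')' cs).toNat)
      have hrlen : (cs.take (firstIdxC ')' cs).toNat).length = (firstIdxC ')' cs).toNat := by
        rw [List.length_take]; omega
      have hrltE : (lastIdxC '(' (cs.take (firstIdxC ')' cs).toNat)).toNat
          < (firstIdxC ')' cs).toNat := by rw [hrlen] at hrlt; omega
      have hxr := lastIdxC_getElem '(' (cs.take (firstIdxC ')' cs).toNat) hr
      have hcr : cs[(lastIdxC '(' (cs.take (firstIdxC ')' cs).toNat)).toNat]? = some '(' := by
        rw [← List.getElem?_take_of_lt hrltE]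
        exact hxr
      have hce : cs[(firstIdxC ')' cs).toNat]? = some ')' := firstIdxC_getElem ')' cs he
      have hsl := slice_found cs (lastIdxC '(' (cs.take (firstIdxC ')' cs).toNat)).toNat
        (firstIdxC ')' cs).toNat hrltE (by omega) hcr hce
      rw [show lastIdxC '(' (cs.take (firstIdxC ')' cs).toNat)
            = (((lastIdxC '(' (cs.take (firstIdxC ')' cs).toNat)).toNat : Nat) : Int) by omega,
          show firstIdxC ')' cs = (((firstIdxC ')' cs).toNat : Nat) : Int) by omega]
      exact hsl

-- ===== VERDICT (by name: the statement is the Claim_ definition above) =====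
theorem find_inner_parentheses_spec : Claim_unchanged_find_inner_parentheses := by
  intro s _
  unfold Spec_find_inner_parentheses
  intro hD
  rw [D_iff] at hD
  unfold find_inner_parentheses find_inner_parentheses_alt
  simp only [PySem.Str.slice, PySem.Chars.slice_eq_listSlice]
  exact congrArg String.ofList (main_list s.toList hD)

set_option maxRecDepth 8192 in
theorem find_inner_parentheses_changed : Claim_changed_find_inner_parentheses := by
  unfold Claim_changed_find_inner_parentheses; decide

theorem find_inner_parentheses_tight : Claim_exact_find_inner_parentheses := by
  intro s _ hD
  rw [D_iff] at hD
  obtain ⟨hnil, hlast, hclean⟩ := hD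
  have hg : s.toList.getLast hnil = ')' := by
    have := List.getLast?_eq_some_getLast (l := s.toList) hnil
    rw [this] at hlast; exact Option.some.inj hlast
  have hdecomp : s.toList.dropLast ++ [')'] = s.toList := by
    have := List.dropLast_concat_getLast hnil
    rw [hg] at this; exact this
  obtain ⟨L, hLdef⟩ : ∃ L, s.toList = L ++ [')'] := ⟨s.toList.dropLast, hdecomp.symm⟩
  have hcleanL : ∀ c ∈ L, c ≠ '(' ∧ c ≠ ')' := by
    intro c hc
    apply hclean
    rw [hLdef, List.dropLast_concat]
    exact hc
  have he : firstIdxC ')' s.toList = (L.length : Int) := by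
    rw [hLdef]
    exact firstIdxC_append_c0 ')' L [] (fun c hc => (hcleanL c hc).2)
  have hxs : s.toList.take ((L.length : Int)).toNat = L := by
    rw [hLdef, Int.toNat_natCast]
    exact List.take_left
  have hr : lastIdxC '(' (s.toList.take ((L.length : Int)).toNat) = -1 := by
    rw [hxs]
    exact (lastIdxC_eq_neg_one_iff '(' _).2 (fun c hc => (hcleanL c hc).1)
  have hne : ¬ ((L.length : Int) = -1) := by omega
  unfold find_inner_parentheses find_inner_parentheses_alt
  simp only [PySem.Str.slice, PySem.Chars.slice_eq_listSlice]
  rw [loopA_spec, loopB_spec]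
  simp only [he, if_neg hne, hr, if_true, Nat.cast_zero, zero_add]
  intro heq
  have hlists := congrArg String.toList heq
  simp only [String.toList_ofList] at hlists
  rw [show ((L.length : Int)) + 1 = ((L.length + 1 : Nat) : Int) by omega, hLdef,
     slice_neg_one_full] at hlists
  simp at hlists
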